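-- pv_equiv track=rewrite | github.com/TJAquiro/Tyler-John-Projects | Python Projects/taquiro_242_PA7 - Order Sim.py | calc_res
-- ===== SOURCE A (Python) =====
-- def calc_res(some_list, res=0):
--     if len(some_list) == 1: #this is the base case where the list length is 1
--                             #checks weather to multply or add to res based on if the valus is odd or even
--         if (some_list[-1] % 2) == 0:
--             return(res * some_list[-1])
--         else:
--             return(res + some_list[-1])
--
--             #below are recusive cases that will make the list smaller by deleting the last value
--             #and passing it back into the function
--
--     if some_list[-1] == 0: #if the number is 0 just add it to the running total (it won't effect anything)
--         return(some_list[-1] + calc_res(some_list[0:len(some_list)-1], res))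
--     if (some_list[-1] % 2) == 0: #if the number is even multiply the running total by it
--         return(some_list[-1] * calc_res(some_list[0:len(some_list)-1], res))
--     else: #if the number is off add it to the running total
--         return(some_list[-1] + calc_res(some_list[0:len(some_list)-1], res))
-- ===== SOURCE B (Python) =====
-- def calc_res(some_list, res=0):
--     acc = res * some_list[0] if some_list[0] % 2 == 0 else res + some_list[0]
--     for x in some_list[1:]:
--         if x != 0 and x % 2 == 0:
--             acc *= x
--         else:
--             acc += x
--     return acc
-- ===== Notes on version B (the rewrite author's own statement) =====
-- stated objective: faster
-- what changed: Replaced A's recursion that re-slices the list from the right on every call with a single left-to-right iterative pass over the list.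
import Mathlib
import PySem

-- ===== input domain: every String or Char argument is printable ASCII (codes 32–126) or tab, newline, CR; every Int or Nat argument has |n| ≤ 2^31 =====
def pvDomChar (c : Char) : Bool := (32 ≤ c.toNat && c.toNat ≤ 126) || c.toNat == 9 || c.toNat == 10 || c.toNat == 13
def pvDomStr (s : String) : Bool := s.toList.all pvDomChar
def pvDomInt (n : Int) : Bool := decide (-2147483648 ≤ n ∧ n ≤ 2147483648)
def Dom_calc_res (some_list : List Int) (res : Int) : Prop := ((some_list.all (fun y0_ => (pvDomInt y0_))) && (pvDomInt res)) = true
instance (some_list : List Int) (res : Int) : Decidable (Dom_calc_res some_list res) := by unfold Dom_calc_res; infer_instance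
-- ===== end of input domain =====

-- B replaces A's slice-copying tail recursion by a single left-to-right pass (objective: faster, asymptotic).

-- ===== PORT A =====
def calc_res (some_list : List Int) (res : Int) : Int :=
  if some_list.length = 1 then
    match PySem.List.pyGet? some_list (-1) with
    | none => 0  -- IndexError (unreachable here; len = 1)
    | some x => if PySem.Int.mod x 2 = 0 then res * x else res + x
  else
    match h : PySem.List.pyGet? some_list (-1) with
    | none => 0  -- IndexError: empty list, excluded by Pre_
    | some x =>
      if x = 0 then
        x + calc_res (PySem.List.slice some_list (some 0) (some ((some_list.length : Int) - 1))) res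
      else if PySem.Int.mod x 2 = 0 then
        x * calc_res (PySem.List.slice some_list (some 0) (some ((some_list.length : Int) - 1))) res
      else
        x + calc_res (PySem.List.slice some_list (some 0) (some ((some_list.length : Int) - 1))) res
termination_by some_list.length
decreasing_by
  all_goals {
    cases some_list with
    | nil => simp [PySem.List.pyGet?] at h
    | cons y ys =>
      have : ((y :: ys).length : Int) - 1 = ((ys.length : Nat) : Int) := by
        simp
      rw [this, PySem.List.slice_zero_start, PySem.List.slice_to_natCast]
      simp [List.length_take] }

-- ===== PORT B =====
def calc_res_alt (some_list : List Int) (res : Int) : Int :=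
  match PySem.List.pyGet? some_list 0 with
  | none => 0  -- IndexError: empty list, excluded by Pre_
  | some x0 =>
    let acc := if PySem.Int.mod x0 2 = 0 then res * x0 else res + x0
    (PySem.List.slice some_list (some 1) none).foldl
      (fun acc x => if x ≠ 0 ∧ PySem.Int.mod x 2 = 0 then acc * x else acc + x) acc

-- ===== PRECONDITION & SPEC =====
-- Pre_ excludes only the empty list, on which both Pythons raise IndexError.
def Pre_calc_res (some_list : List Int) (res : Int) : Prop := some_list ≠ []
instance (some_list : List Int) (res : Int) : Decidable (Pre_calc_res some_list res) := by unfold Pre_calc_res; infer_instance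
def pvWitness_calc_res : List Int × Int := ([3, 4, 0, 5], 2)

def Spec_calc_res (some_list : List Int) (res : Int) (out : Int) : Prop := out = calc_res_alt some_list res
instance (some_list : List Int) (res : Int) (out : Int) : Decidable (Spec_calc_res some_list res out) := by unfold Spec_calc_res; infer_instance

-- ===== CLAIM (what is proved, stated in full; the proofs are below) =====
def Claim_equal_calc_res : Prop := ∀ (some_list : List Int) (res : Int), Dom_calc_res some_list res → Pre_calc_res some_list res → Spec_calc_res some_list res (calc_res some_list res)

-- ===== LEMMAS AND PROOFS =====

-- B's loop body.
def pvStep (acc x : Int) : Int := if x ≠ 0 ∧ PySem.Int.mod x 2 = 0 then acc * x else acc + x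

theorem calc_res_singleton (x0 res : Int) :
    calc_res [x0] res = if PySem.Int.mod x0 2 = 0 then res * x0 else res + x0 := by
  rw [calc_res]
  simp [PySem.List.pyGet?, PySem.List.pyIdx?]

theorem calc_res_snoc (x0 : Int) (xs : List Int) (x res : Int) :
    calc_res (x0 :: (xs ++ [x])) res = pvStep (calc_res (x0 :: xs) res) x := by
  rw [calc_res]
  have hlen : (x0 :: (xs ++ [x])).length ≠ 1 := by simp
  have hget : PySem.List.pyGet? (x0 :: (xs ++ [x])) (-1) = some x := by
    rw [PySem.List.pyGet?_neg_ofNat (x0 :: (xs ++ [x])) 1 (by omega) (by simp)]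
    simp
  have hslice : PySem.List.slice (x0 :: (xs ++ [x])) (some 0) (some (((x0 :: (xs ++ [x])).length : Int) - 1)) = x0 :: xs := by
    have h : ((x0 :: (xs ++ [x])).length : Int) - 1 = (((x0 :: xs).length : Nat) : Int) := by
      simp
    rw [h, PySem.List.slice_zero_start, PySem.List.slice_to_natCast]
    simp
  rw [if_neg hlen]
  split
  next heq => rw [hget] at heq; cases heq
  next y heq =>
    rw [hget] at heq; injection heq with heq; subst heq
    rw [hslice]
    by_cases h0 : x = 0
    · subst h0; simp [pvStep]
    · by_cases hd : (2 : Int) ∣ x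
      · simp [h0, hd, pvStep, PySem.Int.mod_eq_zero_iff_dvd, mul_comm]
      · simp [h0, hd, pvStep, PySem.Int.mod_eq_zero_iff_dvd, add_comm]

theorem calc_res_cons_eq_foldl (xs : List Int) (x0 res : Int) :
    calc_res (x0 :: xs) res =
      xs.foldl pvStep (if PySem.Int.mod x0 2 = 0 then res * x0 else res + x0) := by
  induction xs using List.reverseRecOn with
  | nil => simpa using calc_res_singleton x0 res
  | append_singleton ys y ih =>
    rw [calc_res_snoc, ih, List.foldl_append]
    rfl

-- ===== VERDICT (by name: the statement is the Claim_ definition above) =====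
theorem calc_res_spec : Claim_equal_calc_res := by
  intro some_list res _hdom hpre
  unfold Spec_calc_res
  cases some_list with
  | nil => exact absurd rfl hpre
  | cons x0 xs =>
    rw [calc_res_cons_eq_foldl]
    unfold calc_res_alt
    rw [show PySem.List.pyGet? (x0 :: xs) 0 = some x0 from by
          simp [PySem.List.pyGet?, PySem.List.pyIdx?],
        PySem.List.slice_from_one]
    rfl
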